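-- pv_equiv track=rewrite | github.com/xogusrns123/advance-spec | simulation/pipeline/collect_union_trie.py | _paths_from_flat_tree
-- ===== SOURCE A (Python) =====
-- from typing import Dict, List, Optional, Sequence, Tuple
--
-- def _paths_from_flat_tree(
--     token_ids: Sequence[int],
--     parents: Sequence[int],
-- ) -> List[List[int]]:
--     """Extract all root-to-leaf paths from a flat (token_ids, parents) tree."""
--     n = len(token_ids)
--     if n == 0:
--         return []
--
--     children: Dict[int, List[int]] = {-1: []}
--     for i in range(n):
--         children.setdefault(i, [])
--         children.setdefault(parents[i], []).append(i)
--
--     paths = []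
--
--     def _dfs(node: int, path: List[int]):
--         ch = children.get(node, [])
--         if not ch:
--             if path:
--                 paths.append(list(path))
--             return
--         for c in ch:
--             path.append(token_ids[c])
--             _dfs(c, path)
--             path.pop()
--
--     _dfs(-1, [])
--     return paths
-- ===== SOURCE B (Python) =====
-- def _paths_from_flat_tree(token_ids, parents):
--     """Bottom-up: build each node's list of path suffixes functionally, no mutable path/accumulator."""
--     kids = {}
--     for i in range(len(token_ids)):
--         kids.setdefault(parents[i], []).append(i)
--
--     def suffixes(node):
--         out = []
--         for c in kids.get(node, []):
--             tails = suffixes(c)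
--             if tails:
--                 out.extend([token_ids[c]] + t for t in tails)
--             else:
--                 out.append([token_ids[c]])
--         return out
--
--     return suffixes(-1)
-- ===== Notes on version B (the rewrite author's own statement) =====
-- stated objective: alternative
-- what changed: A does a top-down DFS that threads a mutable shared path and appends copies to a global results list; B recurses bottom-up, each call returning the node's list of path suffixes, prefixing the child's token onto the tails (no mutation, no accumulator), with the same children map.
import Mathlib
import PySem

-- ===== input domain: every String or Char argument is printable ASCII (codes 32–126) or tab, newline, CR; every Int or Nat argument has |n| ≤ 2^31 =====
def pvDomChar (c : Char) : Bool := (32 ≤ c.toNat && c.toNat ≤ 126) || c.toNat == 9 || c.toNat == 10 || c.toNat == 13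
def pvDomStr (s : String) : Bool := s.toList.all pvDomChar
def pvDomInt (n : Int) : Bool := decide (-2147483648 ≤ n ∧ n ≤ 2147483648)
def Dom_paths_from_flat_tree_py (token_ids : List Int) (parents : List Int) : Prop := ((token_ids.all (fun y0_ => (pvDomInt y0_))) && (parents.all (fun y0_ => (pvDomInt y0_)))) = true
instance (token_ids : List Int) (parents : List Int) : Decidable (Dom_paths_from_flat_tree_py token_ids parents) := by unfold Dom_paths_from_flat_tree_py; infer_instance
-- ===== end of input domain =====

-- B replaces A's top-down DFS (mutable shared path + global results list) by a bottom-up recursion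
-- returning each node's list of path suffixes (objective: alternative decomposition, same cost).

-- ===== PORT A =====
-- children = {-1: []}; for i in range(n): children.setdefault(i, []); children.setdefault(parents[i], []).append(i)
def pvBuildA (token_ids parents : List Int) : PySem.Dict Int (List Int) :=
  (PySem.List.pyRange 0 token_ids.length 1).foldl
    (fun d i =>
      (d.setdefault i []).modify ((PySem.List.pyGet? parents i).getD 0) [] (· ++ [i]))
    (PySem.Dict.empty.insert (-1) [])

-- _dfs, with fuel making the recursion structural; fuel n+1 always suffices (proved below)
def pvDfsA (token_ids : List Int) (ch : PySem.Dict Int (List Int)) :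
    Nat → Int → List Int → List (List Int) → List (List Int)
  | 0, _, _, paths => paths
  | f+1, node, path, paths =>
    let cs := ch.getD node []
    if cs = [] then (if path ≠ [] then paths ++ [path] else paths)
    else cs.foldl
      (fun ps c => pvDfsA token_ids ch f c (path ++ [(PySem.List.pyGet? token_ids c).getD 0]) ps)
      paths

def paths_from_flat_tree_py (token_ids : List Int) (parents : List Int) : List (List Int) :=
  if token_ids.length = 0 then []
  else pvDfsA token_ids (pvBuildA token_ids parents) (token_ids.length + 1) (-1) [] []

-- ===== PORT B =====
-- kids = {}; for i in range(len(token_ids)): kids.setdefault(parents[i], []).append(i)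
def pvBuildB (token_ids parents : List Int) : PySem.Dict Int (List Int) :=
  (PySem.List.pyRange 0 token_ids.length 1).foldl
    (fun d i => d.modify ((PySem.List.pyGet? parents i).getD 0) [] (· ++ [i]))
    PySem.Dict.empty

-- suffixes, fueled as pvDfsA is
def pvSuffixes (token_ids : List Int) (ch : PySem.Dict Int (List Int)) :
    Nat → Int → List (List Int)
  | 0, _ => []
  | f+1, node =>
    (ch.getD node []).foldl
      (fun out c =>
        let tails := pvSuffixes token_ids ch f c
        if tails = [] then out ++ [[(PySem.List.pyGet? token_ids c).getD 0]]
        else out ++ tails.map ((PySem.List.pyGet? token_ids c).getD 0 :: ·))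
      []

def paths_from_flat_tree_py_alt (token_ids : List Int) (parents : List Int) : List (List Int) :=
  pvSuffixes token_ids (pvBuildB token_ids parents) (token_ids.length + 1) (-1)

-- ===== PRECONDITION & SPEC =====
-- Pre_ excludes only the inputs where the Python A raises IndexError (parents shorter than token_ids).
def Pre_paths_from_flat_tree_py (token_ids : List Int) (parents : List Int) : Prop :=
  token_ids.length ≤ parents.length
instance (token_ids : List Int) (parents : List Int) : Decidable (Pre_paths_from_flat_tree_py token_ids parents) := by unfold Pre_paths_from_flat_tree_py; infer_instance

def pvWitness_paths_from_flat_tree_py : List Int × List Int := ([5, 6, 7], [-1, 0, 0])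

def Spec_paths_from_flat_tree_py (token_ids : List Int) (parents : List Int) (out : List (List Int)) : Prop := out = paths_from_flat_tree_py_alt token_ids parents
instance (token_ids : List Int) (parents : List Int) (out : List (List Int)) : Decidable (Spec_paths_from_flat_tree_py token_ids parents out) := by unfold Spec_paths_from_flat_tree_py; infer_instance

-- ===== CLAIM (what is proved, stated in full; the proofs are below) =====
def Claim_equal_paths_from_flat_tree_py : Prop := ∀ (token_ids : List Int) (parents : List Int), Dom_paths_from_flat_tree_py token_ids parents → Pre_paths_from_flat_tree_py token_ids parents → Spec_paths_from_flat_tree_py token_ids parents (paths_from_flat_tree_py token_ids parents)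

-- ===== LEMMAS AND PROOFS =====

-- the children list both dicts associate to x: the i < n with parents[i] = x, in increasing order
def pvKids (token_ids parents : List Int) (x : Int) : List Int :=
  (PySem.List.pyRange 0 token_ids.length 1).filter
    (fun i => (PySem.List.pyGet? parents i).getD 0 == x)

theorem pv_sd_getD (d : PySem.Dict Int (List Int)) (i x : Int) :
    (d.setdefault i []).getD x [] = d.getD x [] := by
  by_cases h2 : x = i
  · subst h2; exact PySem.Dict.getD_setdefault_self ..
  · rw [PySem.Dict.getD_eq_get?_getD, PySem.Dict.get?_setdefault_of_ne _ _ h2,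
      ← PySem.Dict.getD_eq_get?_getD]

theorem pv_stepA_getD (parents : List Int) (d : PySem.Dict Int (List Int)) (i x : Int) :
    (((d.setdefault i []).modify ((PySem.List.pyGet? parents i).getD 0) [] (· ++ [i]))).getD x [] =
      (d.getD x []) ++ (if (PySem.List.pyGet? parents i).getD 0 == x then [i] else []) := by
  rw [PySem.Dict.getD_modify, pv_sd_getD, pv_sd_getD]
  by_cases h : x = (PySem.List.pyGet? parents i).getD 0
  · simp [h]
  · simp [h, beq_iff_eq, Ne.symm h]

theorem pv_foldA_getD (parents : List Int) (l : List Int) :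
    ∀ (d : PySem.Dict Int (List Int)) (x : Int),
    (l.foldl (fun d i => (d.setdefault i []).modify ((PySem.List.pyGet? parents i).getD 0) [] (· ++ [i])) d).getD x [] =
      d.getD x [] ++ (l.filter (fun i => (PySem.List.pyGet? parents i).getD 0 == x)) := by
  induction l with
  | nil => simp
  | cons a t ih =>
    intro d x
    simp only [List.foldl_cons, List.filter_cons, ih, pv_stepA_getD]
    by_cases h : (PySem.List.pyGet? parents a).getD 0 == x <;> simp [h]

theorem pv_stepB_getD (parents : List Int) (d : PySem.Dict Int (List Int)) (i x : Int) :
    ((d.modify ((PySem.List.pyGet? parents i).getD 0) [] (· ++ [i]))).getD x [] =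
      (d.getD x []) ++ (if (PySem.List.pyGet? parents i).getD 0 == x then [i] else []) := by
  rw [PySem.Dict.getD_modify]
  by_cases h : x = (PySem.List.pyGet? parents i).getD 0
  · simp [h]
  · simp [h, beq_iff_eq, Ne.symm h]

theorem pv_foldB_getD (parents : List Int) (l : List Int) :
    ∀ (d : PySem.Dict Int (List Int)) (x : Int),
    (l.foldl (fun d i => d.modify ((PySem.List.pyGet? parents i).getD 0) [] (· ++ [i])) d).getD x [] =
      d.getD x [] ++ (l.filter (fun i => (PySem.List.pyGet? parents i).getD 0 == x)) := by
  induction l with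
  | nil => simp
  | cons a t ih =>
    intro d x
    simp only [List.foldl_cons, List.filter_cons, ih, pv_stepB_getD]
    by_cases h : (PySem.List.pyGet? parents a).getD 0 == x <;> simp [h]

theorem pvBuildA_getD (token_ids parents : List Int) (x : Int) :
    (pvBuildA token_ids parents).getD x [] = pvKids token_ids parents x := by
  unfold pvBuildA pvKids
  rw [pv_foldA_getD]
  rw [PySem.Dict.getD_insert]
  split_ifs with h <;> simp [PySem.Dict.getD_empty]

theorem pvBuildB_getD (token_ids parents : List Int) (x : Int) :
    (pvBuildB token_ids parents).getD x [] = pvKids token_ids parents x := by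
  unfold pvBuildB pvKids
  rw [pv_foldB_getD]
  simp [PySem.Dict.getD_empty]

-- ancestor chains: pvChain node l means l lists the nodes from node up to (excluding) the root -1
inductive pvChain (token_ids parents : List Int) : Int → List Int → Prop
  | nil : pvChain token_ids parents (-1) []
  | cons (i : Int) (l : List Int) (h0 : 0 ≤ i) (h1 : i < token_ids.length)
      (hp : pvChain token_ids parents ((PySem.List.pyGet? parents i).getD 0) l) :
      pvChain token_ids parents i (i :: l)

theorem pvChain_unique {token_ids parents : List Int} {x : Int} {l₁ : List Int}
    (h₁ : pvChain token_ids parents x l₁) : ∀ {l₂ : List Int}, pvChain token_ids parents x l₂ → l₁ = l₂ := by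
  induction h₁ with
  | nil =>
    intro l₂ h₂
    cases h₂ with
    | nil => rfl
    | cons i l h0 h1 hp => omega
  | cons i l h0 h1 hp ih =>
    intro l₂ h₂
    cases h₂ with
    | nil => omega
    | cons _ l' h0' h1' hp' => exact congrArg (i :: ·) (ih hp')

theorem pvChain_mem_suffix {token_ids parents : List Int} {x : Int} {l : List Int}
    (h : pvChain token_ids parents x l) :
    ∀ y ∈ l, ∃ t, pvChain token_ids parents y (y :: t) ∧ (y :: t).length ≤ l.length := by
  induction h with
  | nil => intro y hy; cases hy
  | cons i l h0 h1 hp ih =>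
    intro y hy
    cases hy with
    | head => exact ⟨l, pvChain.cons i l h0 h1 hp, le_refl _⟩
    | tail _ hy' =>
      obtain ⟨t, ht, hlen⟩ := ih y hy'
      exact ⟨t, ht, by simpa using Nat.le_succ_of_le hlen⟩

theorem pvChain_nodup {token_ids parents : List Int} {x : Int} {l : List Int}
    (h : pvChain token_ids parents x l) : l.Nodup := by
  induction h with
  | nil => exact List.nodup_nil
  | cons i l h0 h1 hp ih =>
    refine List.nodup_cons.mpr ⟨?_, ih⟩
    intro hmem
    obtain ⟨t, ht, hlen⟩ := pvChain_mem_suffix hp i hmem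
    have := pvChain_unique (pvChain.cons i l h0 h1 hp) ht
    have : l = t := by injection this
    subst this
    simp at hlen

theorem pvChain_mem_range {token_ids parents : List Int} {x : Int} {l : List Int}
    (h : pvChain token_ids parents x l) : ∀ y ∈ l, 0 ≤ y ∧ y < token_ids.length := by
  induction h with
  | nil => intro y hy; cases hy
  | cons i l h0 h1 hp ih =>
    intro y hy
    cases hy with
    | head => exact ⟨h0, h1⟩
    | tail _ hy' => exact ih y hy'

theorem pvChain_length_le {token_ids parents : List Int} {x : Int} {l : List Int}
    (h : pvChain token_ids parents x l) : l.length ≤ token_ids.length := by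
  have hsub : l ⊆ PySem.List.pyRange 0 token_ids.length 1 := by
    intro y hy
    have := pvChain_mem_range h y hy
    rw [PySem.List.mem_pyRange_one]
    omega
  have := (List.subperm_of_subset (pvChain_nodup h) hsub).length_le
  rwa [PySem.List.length_pyRange_one, Int.sub_zero, Int.toNat_natCast] at this

-- a fold whose step appends a per-element block is a flatMap
theorem pvFoldl_blocks {α β : Type} (step : List β → α → List β) (g : α → List β)
    (h : ∀ out c, step out c = out ++ g c) :
    ∀ (cs : List α) (acc : List β), cs.foldl step acc = acc ++ cs.flatMap g := by
  intro cs
  induction cs with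
  | nil => simp
  | cons a t ih => intro acc; simp [h, ih, List.append_assoc]

-- membership-restricted variant (the step is only characterised on elements of cs)
theorem pvFoldl_blocks_mem {α β : Type} (step : List β → α → List β) (g : α → List β) :
    ∀ (cs : List α), (∀ c ∈ cs, ∀ out, step out c = out ++ g c) →
    ∀ (acc : List β), cs.foldl step acc = acc ++ cs.flatMap g := by
  intro cs
  induction cs with
  | nil => simp
  | cons a t ih =>
    intro h acc
    simp only [List.foldl_cons, List.flatMap_cons]
    rw [h a (List.mem_cons_self ..) acc, ih (fun c hc => h c (List.mem_cons_of_mem _ hc)),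
      List.append_assoc]

-- B's fold written as a flatMap
theorem pvSuffixes_succ (token_ids : List Int) (ch : PySem.Dict Int (List Int)) (f : Nat) (node : Int) :
    pvSuffixes token_ids ch (f+1) node =
      (ch.getD node []).flatMap (fun c =>
        if pvSuffixes token_ids ch f c = [] then [[(PySem.List.pyGet? token_ids c).getD 0]]
        else (pvSuffixes token_ids ch f c).map ((PySem.List.pyGet? token_ids c).getD 0 :: ·)) := by
  show (ch.getD node []).foldl _ [] = _
  rw [pvFoldl_blocks _
    (fun c => if pvSuffixes token_ids ch f c = [] then [[(PySem.List.pyGet? token_ids c).getD 0]]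
        else (pvSuffixes token_ids ch f c).map ((PySem.List.pyGet? token_ids c).getD 0 :: ·))
    (fun out c => by
      by_cases h : pvSuffixes token_ids ch f c = [] <;> simp [h]),
    List.nil_append]

theorem pvSuffixes_nonempty (token_ids : List Int) (ch : PySem.Dict Int (List Int)) (f : Nat) (node : Int)
    (h : ch.getD node [] ≠ []) : pvSuffixes token_ids ch (f+1) node ≠ [] := by
  rw [pvSuffixes_succ]
  obtain ⟨c, cs, hcs⟩ := List.exists_cons_of_ne_nil h
  rw [hcs]
  simp only [List.flatMap_cons, ne_eq, List.append_eq_nil_iff, not_and]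
  intro h1
  by_cases hc : pvSuffixes token_ids ch f c = [] <;> simp [hc] at h1

-- suffixes is empty exactly at childless nodes (any positive fuel)
theorem pvSNE (token_ids parents : List Int) (f : Nat) (node : Int) :
    pvSuffixes token_ids (pvBuildB token_ids parents) (f+1) node = [] ↔
      pvKids token_ids parents node = [] := by
  constructor
  · intro h
    by_contra hk
    exact pvSuffixes_nonempty token_ids (pvBuildB token_ids parents) f node
      (by rw [pvBuildB_getD]; exact hk) h
  · intro hk
    rw [pvSuffixes_succ, pvBuildB_getD, hk]
    rfl

-- the main correspondence between A's DFS and B's suffixes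
theorem pvMain (token_ids parents : List Int) :
    ∀ (f : Nat) (node : Int) (l path : List Int) (paths : List (List Int)),
      pvChain token_ids parents node l → token_ids.length + 1 ≤ l.length + f →
      pvDfsA token_ids (pvBuildA token_ids parents) f node path paths =
        paths ++ (if pvKids token_ids parents node = [] then (if path = [] then [] else [path])
          else (pvSuffixes token_ids (pvBuildB token_ids parents) f node).map (path ++ ·)) := by
  intro f
  induction f with
  | zero =>
    intro node l path paths hc hf
    exact absurd hf (by have := pvChain_length_le hc; omega)
  | succ f ih =>
    intro node l path paths hc hf
    show (if (pvBuildA token_ids parents).getD node [] = []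
        then (if path ≠ [] then paths ++ [path] else paths)
        else ((pvBuildA token_ids parents).getD node []).foldl
          (fun ps c => pvDfsA token_ids (pvBuildA token_ids parents) f c
            (path ++ [(PySem.List.pyGet? token_ids c).getD 0]) ps) paths) = _
    rw [pvBuildA_getD]
    by_cases hk : pvKids token_ids parents node = []
    · rw [if_pos hk, if_pos hk]
      by_cases hp : path = [] <;> simp [hp]
    · rw [if_neg hk, if_neg hk]
      -- every child of node extends the chain
      have hmem : ∀ c ∈ pvKids token_ids parents node,
          pvChain token_ids parents c (c :: l) := by
        intro c hc'
        unfold pvKids at hc'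
        rw [List.mem_filter, PySem.List.mem_pyRange_one] at hc'
        refine pvChain.cons c l hc'.1.1 hc'.1.2 ?_
        rw [eq_of_beq hc'.2]
        exact hc
      -- there is a child, so the chain is extendable: f ≥ 1
      obtain ⟨c₀, hc₀⟩ := List.exists_mem_of_ne_nil _ hk
      have hlen : l.length + 1 ≤ token_ids.length :=
        pvChain_length_le (hmem c₀ hc₀)
      obtain ⟨f', rfl⟩ : ∃ f', f = f' + 1 := ⟨f - 1, by omega⟩
      -- A's fold over the children, block by block
      rw [pvFoldl_blocks_mem _
        (fun c => if pvKids token_ids parents c = []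
          then [path ++ [(PySem.List.pyGet? token_ids c).getD 0]]
          else (pvSuffixes token_ids (pvBuildB token_ids parents) (f'+1) c).map
            ((path ++ [(PySem.List.pyGet? token_ids c).getD 0]) ++ ·))
        (pvKids token_ids parents node)
        (by
          intro c hc' out
          rw [ih c (c :: l) (path ++ [(PySem.List.pyGet? token_ids c).getD 0]) out
            (hmem c hc') (by simp only [List.length_cons]; omega)]
          congr 1
          by_cases hkc : pvKids token_ids parents c = [] <;> simp [hkc])]
      -- B's side
      rw [pvSuffixes_succ, pvBuildB_getD, List.map_flatMap]
      congr 1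
      apply List.flatMap_congr
      intro c hc'
      by_cases hkc : pvKids token_ids parents c = []
      · rw [if_pos hkc, if_pos ((pvSNE token_ids parents f' c).mpr hkc)]
        simp
      · rw [if_neg hkc, if_neg (fun h => hkc ((pvSNE token_ids parents f' c).mp h))]
        rw [List.map_map]
        apply List.map_congr_left
        intro t _
        simp only [Function.comp_apply]
        exact (List.append_cons path ((PySem.List.pyGet? token_ids c).getD 0) t).symm

-- ===== VERDICT (by name: the statement is the Claim_ definition above) =====
theorem paths_from_flat_tree_py_spec : Claim_equal_paths_from_flat_tree_py := by
  intro token_ids parents _ _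
  unfold Spec_paths_from_flat_tree_py paths_from_flat_tree_py paths_from_flat_tree_py_alt
  by_cases hn : token_ids.length = 0
  · rw [if_pos hn, hn, pvSuffixes_succ, pvBuildB_getD]
    unfold pvKids
    rw [hn]
    rfl
  · rw [if_neg hn,
      pvMain token_ids parents (token_ids.length + 1) (-1) [] [] [] pvChain.nil (by simp)]
    by_cases hk : pvKids token_ids parents (-1) = []
    · rw [if_pos hk]
      rw [(pvSNE token_ids parents token_ids.length (-1)).mpr hk]
      simp
    · rw [if_neg hk]
      simp
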